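-- pv_equiv track=rewrite | github.com/sonu-arkfins/genesis_beta_with_25_students | main.py | generate_schedule_options
-- ===== SOURCE A (Python) =====
-- from typing import List, Dict
--
-- def generate_schedule_options(remaining_courses: List[str], offerings: Dict, max_credits=12):
--     options = []
--     course_list = list(offerings.items())
--
--     def backtrack(schedule=[], total_credits=0, index=0):
--         if total_credits >= max_credits or index >= len(course_list):
--             if schedule:
--                 options.append(schedule.copy())
--             return
--
--         for i in range(index, len(course_list)):
--             course, meta = course_list[i]
--             if course in remaining_courses and course not in [c[0] for c in schedule]:
--                 if total_credits + meta["credits"] <= max_credits: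
--                     schedule.append((course, meta))
--                     backtrack(schedule, total_credits + meta["credits"], i + 1)
--                     schedule.pop()
--
--     backtrack()
--     return options[:4]
-- ===== SOURCE B (Python) =====
-- from typing import List, Dict
--
-- def generate_schedule_options(remaining_courses: List[str], offerings: Dict, max_credits=12):
--     course_list = list(offerings.items())
--     n = len(course_list)
--     options = []
--     stack = [([], 0, 0)]  # (schedule, total_credits, next index)
--     while stack:
--         schedule, total, index = stack.pop()
--         if total >= max_credits or index >= n:
--             if schedule:
--                 options.append(schedule)
--             continue
--         children = []
--         for j in range(index, n):
--             course, meta = course_list[j]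
--             if course in remaining_courses and course not in [c[0] for c in schedule]:
--                 if total + meta["credits"] <= max_credits:
--                     children.append((schedule + [(course, meta)], total + meta["credits"], j + 1))
--         stack.extend(reversed(children))
--     return options[:4]
-- ===== Notes on version B (the rewrite author's own statement) =====
-- stated objective: alternative
-- what changed: Replaced the recursive closure-mutating backtracking (nested def, shared schedule list with append/pop) by an iterative DFS over an explicit LIFO stack of immutable (schedule, total, next-index) states, pushing valid extensions in reverse so pop order reproduces A's pre-order emission.
import Mathlib
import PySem

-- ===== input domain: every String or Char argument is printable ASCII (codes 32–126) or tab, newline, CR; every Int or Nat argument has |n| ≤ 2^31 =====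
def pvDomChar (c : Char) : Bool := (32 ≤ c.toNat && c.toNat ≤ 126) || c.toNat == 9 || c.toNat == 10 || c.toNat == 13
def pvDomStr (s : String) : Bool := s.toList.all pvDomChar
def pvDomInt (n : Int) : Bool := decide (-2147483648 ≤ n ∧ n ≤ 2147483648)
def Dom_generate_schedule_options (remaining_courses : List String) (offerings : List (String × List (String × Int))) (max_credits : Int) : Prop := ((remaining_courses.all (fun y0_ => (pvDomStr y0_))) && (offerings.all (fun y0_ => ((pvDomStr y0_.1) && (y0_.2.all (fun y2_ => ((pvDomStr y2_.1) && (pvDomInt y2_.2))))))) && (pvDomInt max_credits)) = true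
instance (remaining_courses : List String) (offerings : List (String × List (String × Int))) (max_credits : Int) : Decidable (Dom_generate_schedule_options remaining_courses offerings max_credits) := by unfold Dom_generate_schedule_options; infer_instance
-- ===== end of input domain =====

-- B replaces A's recursive closure-mutating backtracking by an iterative DFS over an explicit
-- LIFO stack of immutable (schedule, total, next-index) states; same return value (alternative).

-- Shared input normalisation: the Python argument is a dict of dicts — list(offerings.items())
-- with duplicate keys collapsed Python-style (outer and inner), exactly what both Pythons receive.
def pvCourseList (offerings : List (String × List (String × Int))) : List (String × List (String × Int)) :=
  (PySem.Dict.ofList (offerings.map (fun p => (p.1, (PySem.Dict.ofList p.2).items)))).items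

-- meta["credits"]; the default 0 is unreachable under Pre_ (otherwise Python raises KeyError)
def pvCredits (m : List (String × Int)) : Int := (PySem.Dict.mk m).getD "credits" 0

-- ===== PORT A =====
-- backtrack(schedule, total_credits, index): the 'for i in range(index, len(course_list))' loop is
-- the mutually recursive pvLoopA; 'options' is the threaded opts accumulator; schedule append/pop
-- becomes passing sch ++ [(c, m)] down (the pop is the unchanged sch in the continuing loop).
-- 'fuel' is only a structural totality guard: the recursion alternates pvBT (depth 2*(len-index)+1)
-- and pvLoopA (depth 2*(len-j)), so the fuel 2*len+2 supplied below is never exhausted.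
mutual
def pvBT (remaining : List String) (cl : List (String × List (String × Int))) (maxc : Int)
    (fuel : Nat) (opts : List (List (String × List (String × Int))))
    (sch : List (String × List (String × Int))) (total : Int) (index : Nat) :
    List (List (String × List (String × Int))) :=
  match fuel with
  | 0 => opts
  | fuel + 1 =>
    if total ≥ maxc ∨ cl.length ≤ index then
      (if sch.isEmpty then opts else opts ++ [sch])
    else pvLoopA remaining cl maxc fuel opts sch total index
termination_by structural fuel

def pvLoopA (remaining : List String) (cl : List (String × List (String × Int))) (maxc : Int)
    (fuel : Nat) (opts : List (List (String × List (String × Int))))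
    (sch : List (String × List (String × Int))) (total : Int) (j : Nat) :
    List (List (String × List (String × Int))) :=
  match fuel with
  | 0 => opts
  | fuel + 1 =>
    if j < cl.length then
      if (cl.getD j ("", [])).1 ∈ remaining ∧ (cl.getD j ("", [])).1 ∉ sch.map Prod.fst then
        if total + pvCredits (cl.getD j ("", [])).2 ≤ maxc then
          pvLoopA remaining cl maxc fuel
            (pvBT remaining cl maxc fuel opts (sch ++ [((cl.getD j ("", [])).1, (cl.getD j ("", [])).2)])
              (total + pvCredits (cl.getD j ("", [])).2) (j + 1))
            sch total (j + 1)
        else pvLoopA remaining cl maxc fuel opts sch total (j + 1)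
      else pvLoopA remaining cl maxc fuel opts sch total (j + 1)
    else opts
termination_by structural fuel
end

def generate_schedule_options (remaining_courses : List String) (offerings : List (String × List (String × Int))) (max_credits : Int) : List (List (String × (List (String × Int)))) :=
  (pvBT remaining_courses (pvCourseList offerings) max_credits
    (2 * (pvCourseList offerings).length + 2) [] [] 0 0).take 4

-- ===== PORT B =====
-- children of a popped state: the inner 'for j in range(index, n)' of Source B building the list of
-- valid one-course extensions, in forward index order (Source B pushes them reversed; with the Lean
-- stack's head as top of stack, popping reversed pushes = consuming this forward list head-first).
def pvChildren (remaining : List String) (cl : List (String × List (String × Int))) (maxc : Int)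
    (sch : List (String × List (String × Int))) (total : Int) (index : Nat) :
    List ((List (String × List (String × Int))) × Int × Nat) :=
  (List.range' index (cl.length - index)).foldl (fun acc j =>
    if (cl.getD j ("", [])).1 ∈ remaining ∧ (cl.getD j ("", [])).1 ∉ sch.map Prod.fst ∧
        total + pvCredits (cl.getD j ("", [])).2 ≤ maxc then
      acc ++ [(sch ++ [((cl.getD j ("", [])).1, (cl.getD j ("", [])).2)],
               total + pvCredits (cl.getD j ("", [])).2, j + 1)]
    else acc) []

-- the while-stack loop of Source B: pop a state, emit or push its extensions. 'fuel' is only a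
-- structural totality guard: each iteration strictly decreases the factorial stack potential
-- pvMeas, which starts at (len+1)!, so the fuel supplied below is never exhausted.
def pvRun (remaining : List String) (cl : List (String × List (String × Int))) (maxc : Int)
    (fuel : Nat) (stack : List ((List (String × List (String × Int))) × Int × Nat))
    (opts : List (List (String × List (String × Int)))) : List (List (String × List (String × Int))) :=
  match fuel, stack with
  | _, [] => opts
  | 0, _ => opts
  | fuel + 1, (sch, total, index) :: rest =>
    if total ≥ maxc ∨ cl.length ≤ index then
      pvRun remaining cl maxc fuel rest (if sch.isEmpty then opts else opts ++ [sch])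
    else
      pvRun remaining cl maxc fuel (pvChildren remaining cl maxc sch total index ++ rest) opts
termination_by structural fuel

def generate_schedule_options_alt (remaining_courses : List String) (offerings : List (String × List (String × Int))) (max_credits : Int) : List (List (String × (List (String × Int)))) :=
  (pvRun remaining_courses (pvCourseList offerings) max_credits
    (Nat.factorial ((pvCourseList offerings).length + 1)) [([], 0, 0)] []).take 4

-- ===== PRECONDITION & SPEC =====
-- Pre_ excludes exactly the inputs where Python A raises KeyError: max_credits > 0 and some offered
-- course that is in remaining_courses has no "credits" key in its meta dict (the top-level loop then
-- evaluates meta["credits"] for every such course). Python B raises there too.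
def Pre_generate_schedule_options (remaining_courses : List String) (offerings : List (String × List (String × Int))) (max_credits : Int) : Prop :=
  0 < max_credits → ∀ p ∈ (PySem.Dict.ofList offerings).items,
    p.1 ∈ remaining_courses → "credits" ∈ p.2.map Prod.fst
instance (remaining_courses : List String) (offerings : List (String × List (String × Int))) (max_credits : Int) : Decidable (Pre_generate_schedule_options remaining_courses offerings max_credits) := by unfold Pre_generate_schedule_options; infer_instance

def pvWitness_generate_schedule_options : List String × (List (String × List (String × Int))) × Int :=
  (["a", "b"], [("a", [("credits", 3)]), ("c", [("credits", 4)])], 12)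

def Spec_generate_schedule_options (remaining_courses : List String) (offerings : List (String × List (String × Int))) (max_credits : Int) (out : List (List (String × (List (String × Int))))) : Prop := out = generate_schedule_options_alt remaining_courses offerings max_credits
instance (remaining_courses : List String) (offerings : List (String × List (String × Int))) (max_credits : Int) (out : List (List (String × (List (String × Int))))) : Decidable (Spec_generate_schedule_options remaining_courses offerings max_credits out) := by unfold Spec_generate_schedule_options; infer_instance

-- ===== CLAIM (what is proved, stated in full; the proofs are below) =====
def Claim_equal_generate_schedule_options : Prop := ∀ (remaining_courses : List String) (offerings : List (String × List (String × Int))) (max_credits : Int), Dom_generate_schedule_options remaining_courses offerings max_credits → Pre_generate_schedule_options remaining_courses offerings max_credits → Spec_generate_schedule_options remaining_courses offerings max_credits (generate_schedule_options remaining_courses offerings max_credits)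

-- ===== LEMMAS AND PROOFS =====

-- processing one state with A's backtracker at the (always sufficient) fuel A's entry point uses
def pvStep (remaining : List String) (cl : List (String × List (String × Int))) (maxc : Int)
    (opts : List (List (String × List (String × Int))))
    (st : (List (String × List (String × Int))) × Int × Nat) : List (List (String × List (String × Int))) :=
  pvBT remaining cl maxc (2 * cl.length + 2) opts st.1 st.2.1 st.2.2

-- the valid extensions of a state, in forward index order, as a filter-map over the index range
def pvExtsP (remaining : List String) (cl : List (String × List (String × Int))) (maxc : Int)
    (sch : List (String × List (String × Int))) (total : Int) (j : Nat) :
    List ((List (String × List (String × Int))) × Int × Nat) :=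
  ((List.range' j (cl.length - j)).filter (fun j =>
      decide ((cl.getD j ("", [])).1 ∈ remaining ∧ (cl.getD j ("", [])).1 ∉ sch.map Prod.fst ∧
        total + pvCredits (cl.getD j ("", [])).2 ≤ maxc))).map (fun j =>
    (sch ++ [((cl.getD j ("", [])).1, (cl.getD j ("", [])).2)],
     total + pvCredits (cl.getD j ("", [])).2, j + 1))

theorem pvChildren_eq (remaining : List String) (cl : List (String × List (String × Int))) (maxc : Int)
    (sch : List (String × List (String × Int))) (total : Int) (index : Nat) :
    pvChildren remaining cl maxc sch total index = pvExtsP remaining cl maxc sch total index := by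
  unfold pvChildren pvExtsP
  rw [PySem.List.foldl_append_ite]
  simp

-- fuel irrelevance: any two fuels at least the recursion depth compute the same value
theorem pvFuel_mono (remaining : List String) (cl : List (String × List (String × Int))) (maxc : Int) :
    ∀ (f g : Nat), f ≤ g →
      (∀ opts sch total index, 2 * (cl.length - index) + 1 ≤ f →
        pvBT remaining cl maxc f opts sch total index = pvBT remaining cl maxc g opts sch total index) ∧
      (∀ opts sch total j, 2 * (cl.length - j) ≤ f →
        pvLoopA remaining cl maxc f opts sch total j = pvLoopA remaining cl maxc g opts sch total j) := by
  intro f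
  induction f with
  | zero =>
    intro g _
    constructor
    · intro opts sch total index hb; exact absurd hb (by omega)
    · intro opts sch total j hb
      have hj : ¬ j < cl.length := by omega
      cases g with
      | zero => rfl
      | succ g => rw [pvLoopA, pvLoopA]; simp [hj]
  | succ f ih =>
    intro g hg
    cases g with
    | zero => exact absurd hg (by omega)
    | succ g =>
      have ihg := ih g (by omega)
      constructor
      · intro opts sch total index hb
        rw [pvBT, pvBT]
        by_cases h : total ≥ maxc ∨ cl.length ≤ index
        · simp [h]
        · simp only [h, if_false]
          exact ihg.2 opts sch total index (by omega)
      · intro opts sch total j hb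
        rw [pvLoopA, pvLoopA]
        by_cases h : j < cl.length
        · simp only [h, if_true]
          have h1 := ihg.1 opts (sch ++ [((cl.getD j ("", [])).1, (cl.getD j ("", [])).2)])
            (total + pvCredits (cl.getD j ("", [])).2) (j + 1) (by omega)
          have h2 : ∀ o, pvLoopA remaining cl maxc f o sch total (j + 1)
              = pvLoopA remaining cl maxc g o sch total (j + 1) := fun o =>
            ihg.2 o sch total (j + 1) (by omega)
          split
          · split
            · rw [h1, h2]
            · rw [h2]
          · rw [h2]
        · simp [h]

-- any two sufficient fuels agree (symmetric corollary of pvFuel_mono)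
theorem pvBT_fuel_irrel (remaining : List String) (cl : List (String × List (String × Int))) (maxc : Int)
    (f g : Nat) (opts : List (List (String × List (String × Int))))
    (sch : List (String × List (String × Int))) (total : Int) (index : Nat)
    (hf : 2 * (cl.length - index) + 1 ≤ f) (hg : 2 * (cl.length - index) + 1 ≤ g) :
    pvBT remaining cl maxc f opts sch total index = pvBT remaining cl maxc g opts sch total index := by
  rcases le_total f g with h | h
  · exact (pvFuel_mono remaining cl maxc f g h).1 opts sch total index hf
  · exact ((pvFuel_mono remaining cl maxc g f h).1 opts sch total index hg).symm

-- A's inner loop = folding A's backtracker over the forward extension list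
theorem pvLoopA_eq_foldl (remaining : List String) (cl : List (String × List (String × Int))) (maxc : Int)
    (sch : List (String × List (String × Int))) (total : Int) :
    ∀ (k j : Nat), cl.length ≤ j + k → ∀ (f : Nat), 2 * (cl.length - j) ≤ f →
      ∀ opts, pvLoopA remaining cl maxc f opts sch total j =
        (pvExtsP remaining cl maxc sch total j).foldl (pvStep remaining cl maxc) opts := by
  intro k
  induction k with
  | zero =>
    intro j hj f _ opts
    have h : ¬ j < cl.length := by omega
    have he : cl.length - j = 0 := by omega
    cases f with
    | zero => simp [pvLoopA, pvExtsP, he]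
    | succ f => simp [pvLoopA, pvExtsP, he, h]
  | succ k ih =>
    intro j hj f hf opts
    by_cases h : j < cl.length
    · have hfs : ∃ f', f = f' + 1 := by
        cases f with
        | zero => omega
        | succ f => exact ⟨f, rfl⟩
      obtain ⟨f', rfl⟩ := hfs
      rw [pvLoopA]
      simp only [h, if_true]
      have hrange : cl.length - j = (cl.length - (j + 1)) + 1 := by omega
      have hcons : List.range' j (cl.length - j) = j :: List.range' (j + 1) (cl.length - (j + 1)) := by
        rw [hrange, List.range'_succ]
      by_cases h1 : (cl.getD j ("", [])).1 ∈ remaining ∧ (cl.getD j ("", [])).1 ∉ sch.map Prod.fst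
      · by_cases h2 : total + pvCredits (cl.getD j ("", [])).2 ≤ maxc
        · have hc : (cl.getD j ("", [])).1 ∈ remaining ∧ (cl.getD j ("", [])).1 ∉ sch.map Prod.fst ∧
              total + pvCredits (cl.getD j ("", [])).2 ≤ maxc := ⟨h1.1, h1.2, h2⟩
          rw [if_pos h1, if_pos h2]
          have hj1 : cl.length ≤ (j + 1) + k := by omega
          have hf1 : 2 * (cl.length - (j + 1)) ≤ f' := by omega
          have hrec := ih (j + 1) hj1 f' hf1
          rw [hrec]
          unfold pvExtsP
          rw [hcons, List.filter_cons_of_pos (by simpa using hc), List.map_cons, List.foldl_cons]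
          congr 1
          unfold pvStep
          exact pvBT_fuel_irrel remaining cl maxc f' (2 * cl.length + 2) opts
            (sch ++ [((cl.getD j ("", [])).1, (cl.getD j ("", [])).2)])
            (total + pvCredits (cl.getD j ("", [])).2) (j + 1) (by omega) (by omega)
        · have hc : ¬ ((cl.getD j ("", [])).1 ∈ remaining ∧ (cl.getD j ("", [])).1 ∉ sch.map Prod.fst ∧
              total + pvCredits (cl.getD j ("", [])).2 ≤ maxc) := by tauto
          rw [if_pos h1, if_neg h2]
          have hj1 : cl.length ≤ (j + 1) + k := by omega
          have hf1 : 2 * (cl.length - (j + 1)) ≤ f' := by omega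
          have hrec := ih (j + 1) hj1 f' hf1
          rw [hrec]
          unfold pvExtsP
          rw [hcons, List.filter_cons_of_neg (by simpa using hc)]
      · have hc : ¬ ((cl.getD j ("", [])).1 ∈ remaining ∧ (cl.getD j ("", [])).1 ∉ sch.map Prod.fst ∧
            total + pvCredits (cl.getD j ("", [])).2 ≤ maxc) := by tauto
        rw [if_neg h1]
        have hj1 : cl.length ≤ (j + 1) + k := by omega
        have hf1 : 2 * (cl.length - (j + 1)) ≤ f' := by omega
        have hrec := ih (j + 1) hj1 f' hf1
        rw [hrec]
        unfold pvExtsP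
        rw [hcons, List.filter_cons_of_neg (by simpa using hc)]
    · have he : cl.length - j = 0 := by omega
      cases f with
      | zero => simp [pvLoopA, pvExtsP, he]
      | succ f => simp [pvLoopA, pvExtsP, he, h]

-- factorial stack potential: the termination/fuel measure of Source B's while loop
def pvMeas (n : Nat) (stack : List ((List (String × List (String × Int))) × Int × Nat)) : Nat :=
  (stack.map (fun s => Nat.factorial (n + 1 - s.2.2))).sum

theorem pvMeas_exts_lt (remaining : List String) (cl : List (String × List (String × Int))) (maxc : Int)
    (sch : List (String × List (String × Int))) (total : Int) (j : Nat) :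
    pvMeas cl.length (pvExtsP remaining cl maxc sch total j) < Nat.factorial (cl.length + 1 - j) := by
  have main : ∀ (k j : Nat), cl.length ≤ j + k →
      pvMeas cl.length (pvExtsP remaining cl maxc sch total j) < Nat.factorial (cl.length + 1 - j) := by
    intro k
    induction k with
    | zero =>
      intro j hj
      have he : cl.length - j = 0 := by omega
      simp only [pvExtsP, he, List.range'_zero, List.filter_nil, List.map_nil, pvMeas,
        List.sum_nil]
      exact Nat.factorial_pos _
    | succ k ih =>
      intro j hj
      by_cases h : j < cl.length
      · have ihj := ih (j + 1) (by omega)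
        have hrange : cl.length - j = (cl.length - (j + 1)) + 1 := by omega
        have hcons : List.range' j (cl.length - j) = j :: List.range' (j + 1) (cl.length - (j + 1)) := by
          rw [hrange, List.range'_succ]
        unfold pvExtsP at *
        rw [hcons]
        by_cases hc : (cl.getD j ("", [])).1 ∈ remaining ∧ (cl.getD j ("", [])).1 ∉ sch.map Prod.fst ∧
            total + pvCredits (cl.getD j ("", [])).2 ≤ maxc
        · rw [List.filter_cons_of_pos (by simpa using hc), List.map_cons]
          simp only [pvMeas, List.map_cons, List.sum_cons] at *
          have h2 : cl.length + 1 - (j + 1) = cl.length - j := by omega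
          have h3 : cl.length + 1 - j = (cl.length - j) + 1 := by omega
          rw [h2, h3, Nat.factorial_succ]
          rw [h2] at ihj
          have hm : 2 ≤ cl.length - j + 1 := by omega
          have h4 : 2 * (cl.length - j).factorial ≤ (cl.length - j + 1) * (cl.length - j).factorial :=
            Nat.mul_le_mul_right _ hm
          omega
        · rw [List.filter_cons_of_neg (by simpa using hc)]
          have h2 : Nat.factorial (cl.length + 1 - (j + 1)) ≤ Nat.factorial (cl.length + 1 - j) :=
            Nat.factorial_le (by omega)
          omega
      · have he : cl.length - j = 0 := by omega
        simp only [pvExtsP, he, List.range'_zero, List.filter_nil, List.map_nil, pvMeas,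
          List.sum_nil]
        exact Nat.factorial_pos _
  exact main cl.length j (by omega)

-- B's stack loop = folding A's backtracker over the stack (fuel bounded below by the potential)
theorem pvRun_eq_foldl (remaining : List String) (cl : List (String × List (String × Int))) (maxc : Int) :
    ∀ (g : Nat) (stack : List ((List (String × List (String × Int))) × Int × Nat))
      (opts : List (List (String × List (String × Int)))), pvMeas cl.length stack ≤ g →
      pvRun remaining cl maxc g stack opts = stack.foldl (pvStep remaining cl maxc) opts := by
  intro g
  induction g with
  | zero =>
    intro stack opts hm
    cases stack with
    | nil => rfl
    | cons st rest =>
      exfalso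
      have : 1 ≤ pvMeas cl.length (st :: rest) := by
        simp only [pvMeas, List.map_cons, List.sum_cons]
        have := Nat.factorial_pos (cl.length + 1 - st.2.2)
        omega
      omega
  | succ g ih =>
    intro stack opts hm
    cases stack with
    | nil => rfl
    | cons st rest =>
      obtain ⟨sch, total, index⟩ := st
      have hfact := Nat.factorial_pos (cl.length + 1 - index)
      rw [pvRun]
      by_cases hg : total ≥ maxc ∨ cl.length ≤ index
      · simp only [hg, if_true]
        rw [ih rest _ (by simp only [pvMeas, List.map_cons, List.sum_cons] at hm ⊢; omega)]
        rw [List.foldl_cons]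
        congr 1
        unfold pvStep
        rw [show 2 * cl.length + 2 = (2 * cl.length + 1) + 1 from rfl, pvBT]
        simp [hg]
      · simp only [hg, if_false]
        have hlt := pvMeas_exts_lt remaining cl maxc sch total index
        rw [pvChildren_eq]
        rw [ih _ opts (by
          simp only [pvMeas, List.map_append, List.sum_append, List.map_cons, List.sum_cons] at hm hlt ⊢
          omega)]
        rw [List.foldl_append, List.foldl_cons]
        congr 1
        unfold pvStep
        rw [show 2 * cl.length + 2 = (2 * cl.length + 1) + 1 from rfl, pvBT]
        simp only [hg, if_false]
        exact (pvLoopA_eq_foldl remaining cl maxc sch total cl.length index (by omega)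
          (2 * cl.length + 1) (by omega) opts).symm

-- ===== VERDICT (by name: the statement is the Claim_ definition above) =====
theorem generate_schedule_options_spec : Claim_equal_generate_schedule_options := by
  intro remaining offerings maxc _ _
  unfold Spec_generate_schedule_options generate_schedule_options generate_schedule_options_alt
  rw [pvRun_eq_foldl remaining (pvCourseList offerings) maxc _ _ _ (by
    simp [pvMeas])]
  rfl
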